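-- pv_equiv track=rewrite | github.com/dannlee/algor | kickstart/2020/roundG/Kick_Start.py | solve
-- ===== SOURCE A (Python) =====
-- def solve(s) :
--     cnt = 0 # num encountered with KICK
--     ans = 0
--
--     kcnt = 0
--     scnt = 0
--     prev =''
--
--     for c in s :
--         if prev=='K' and c=='I' :
--             kcnt=1
--         elif prev=='I' and c=='C' and kcnt==1:
--             kcnt=2
--         elif prev=='C' and c=='K' and kcnt==2:
--             cnt+=1
--             kcnt=0
--         else :
--             kcnt=0
--
--
--         if prev=='S' and c=='T' :
--             scnt=1
--         elif prev=='T' and c=='A' and scnt==1: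
--             scnt=2
--         elif prev=='A' and c=='R' and scnt==2:
--             scnt=3
--         elif prev=='R' and c=='T' and scnt==3:
--             ans+=cnt
--             scnt=0
--         else :
--             scnt=0
--
--         prev = c
--
--     return ans
-- ===== SOURCE B (Python) =====
-- def solve(s):
--     kicks = [i for i in range(len(s)) if s[i:i+4] == "KICK"]
--     starts = [j for j in range(len(s)) if s[j:j+5] == "START"]
--     return sum(len([k for k in kicks if k <= j]) for j in starts)
-- ===== Notes on version B (the rewrite author's own statement) =====
-- stated objective: alternative
-- what changed: Replaces A's single-pass character DFA (a state machine tracking partial KICK/START progress) by a two-phase index scan: collect the start indices of every KICK window and every START window via substring slicing, then sum for each START index the count of KICK indices at or before it.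
import Mathlib
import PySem

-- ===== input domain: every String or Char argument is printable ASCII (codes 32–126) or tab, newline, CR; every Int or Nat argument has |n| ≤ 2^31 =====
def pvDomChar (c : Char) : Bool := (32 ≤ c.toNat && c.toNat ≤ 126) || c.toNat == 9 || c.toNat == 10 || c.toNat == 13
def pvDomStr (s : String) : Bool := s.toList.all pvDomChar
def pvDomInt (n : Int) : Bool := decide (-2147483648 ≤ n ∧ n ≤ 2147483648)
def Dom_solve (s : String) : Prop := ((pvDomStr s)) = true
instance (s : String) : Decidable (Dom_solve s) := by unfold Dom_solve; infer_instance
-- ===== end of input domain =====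

-- B replaces A's char-by-char DFA by a two-phase scan: collect the start indices of every
-- "KICK" and "START" window, then sum, for each START index j, the number of KICK indices ≤ j.


-- ===== PORT A =====
-- one step of A's loop body; state = (cnt, ans, kcnt, scnt, prev), prev as a one-char list ('' = [])
def solveStep (st : Int × Int × Int × Int × List Char) (c : Char) :
    Int × Int × Int × Int × List Char :=
  match st with
  | (cnt, ans, kcnt, scnt, prev) =>
    let ck : Int × Int :=
      if prev == ['K'] && c == 'I' then (cnt, 1)
      else if prev == ['I'] && c == 'C' && kcnt == 1 then (cnt, 2)
      else if prev == ['C'] && c == 'K' && kcnt == 2 then (cnt + 1, 0)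
      else (cnt, 0)
    let sa : Int × Int :=
      if prev == ['S'] && c == 'T' then (ans, 1)
      else if prev == ['T'] && c == 'A' && scnt == 1 then (ans, 2)
      else if prev == ['A'] && c == 'R' && scnt == 2 then (ans, 3)
      else if prev == ['R'] && c == 'T' && scnt == 3 then (ans + ck.1, 0)
      else (ans, 0)
    (ck.1, sa.1, ck.2, sa.2, [c])

def solve (s : String) : Int :=
  (s.toList.foldl solveStep (0, 0, 0, 0, ([] : List Char))).2.1

-- ===== PORT B =====
def solve_alt (s : String) : Int :=
  let l := s.toList
  let kicks := (PySem.List.pyRange 0 (PySem.List.len l) 1).filter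
      (fun i => PySem.List.slice l (some i) (some (i + 4)) == "KICK".toList)
  let starts := (PySem.List.pyRange 0 (PySem.List.len l) 1).filter
      (fun j => PySem.List.slice l (some j) (some (j + 5)) == "START".toList)
  (starts.map (fun j => ((kicks.filter (fun k => decide (k ≤ j))).length : Int))).sum

-- ===== PRECONDITION & SPEC =====
def Spec_solve (s : String) (out : Int) : Prop := out = solve_alt s
instance (s : String) (out : Int) : Decidable (Spec_solve s out) := by unfold Spec_solve; infer_instance

-- ===== CLAIM (what is proved, stated in full; the proofs are below) =====
def Claim_equal_solve : Prop := ∀ (s : String), Dom_solve s → Spec_solve s (solve s)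

-- ===== LEMMAS AND PROOFS =====

-- window match of w at position k in l
def winAt (l w : List Char) (k : Nat) : Bool := ((l.drop k).take w.length) == w
-- all window-match positions of w in l
def idxsC (l w : List Char) : List Nat := (List.range l.length).filter (winAt l w)
-- "l ends with r.reverse", phrased on the reversed pattern r
def endsR (l r : List Char) : Bool := l.reverse.take r.length == r

def kickW : List Char := ['K', 'I', 'C', 'K']
def startW : List Char := ['S', 'T', 'A', 'R', 'T']

def cntOf (l : List Char) : Int := ((idxsC l kickW).length : Int)
def ansOf (l : List Char) : Int :=
  ((idxsC l startW).map
    (fun j => (((idxsC l kickW).filter (fun k => decide (k ≤ j))).length : Int))).sum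
def kcOf (l : List Char) : Int :=
  if endsR l ['C', 'I', 'K'] then 2 else if endsR l ['I', 'K'] then 1 else 0
def scOf (l : List Char) : Int :=
  if endsR l ['R', 'A', 'T', 'S'] then 3
  else if endsR l ['A', 'T', 'S'] then 2
  else if endsR l ['T', 'S'] then 1 else 0
def prevOf (l : List Char) : List Char := l.reverse.take 1

lemma endsR_iff {l r : List Char} : endsR l r = true ↔ l.reverse.take r.length = r := by
  simp [endsR]

lemma endsR_len {l r : List Char} (h : endsR l r = true) : r.length ≤ l.length := by
  have h' := endsR_iff.mp h
  have := congrArg List.length h'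
  simp [List.length_take] at this
  omega

lemma endsR_take {l r : List Char} (h : endsR l r = true) (m : Nat) :
    endsR l (r.take m) = true := by
  rw [endsR_iff] at h ⊢
  rw [List.length_take]
  calc l.reverse.take (min m r.length) = (l.reverse.take r.length).take m := by
        rw [List.take_take]
    _ = r.take m := by rw [h]

lemma endsR_unique {l r1 r2 : List Char} (h1 : endsR l r1 = true) (h2 : endsR l r2 = true)
    (h : r1.length ≤ r2.length) : r1 = r2.take r1.length := by
  have e1 := endsR_iff.mp h1
  have e2 := endsR_iff.mp h2
  rw [← e2, List.take_take, min_eq_left h]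
  exact e1.symm

lemma endsR_clash {l r1 r2 : List Char} (h12 : r1.length ≤ r2.length)
    (hne : r2.take r1.length ≠ r1) (h2 : endsR l r2 = true) : endsR l r1 = false := by
  cases h1 : endsR l r1 with
  | false => rfl
  | true => exact absurd (endsR_unique h1 h2 h12).symm hne

lemma endsR_concat (l : List Char) (c a : Char) (r : List Char) :
    endsR (l ++ [c]) (a :: r) = ((c == a) && endsR l r) := by
  simp [endsR, List.reverse_append, List.cons_beq_cons]

lemma prev_concat (l : List Char) (c : Char) : prevOf (l ++ [c]) = [c] := by
  simp [prevOf, List.reverse_append]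

lemma prev_beq (l : List Char) (a : Char) : (prevOf l == [a]) = endsR l [a] := rfl

lemma winAt_low {l : List Char} {w : List Char} {k : Nat} (c : Char)
    (h : k + w.length ≤ l.length) : winAt (l ++ [c]) w k = winAt l w k := by
  unfold winAt
  rw [List.drop_append_of_le_length (by omega),
      List.take_append_of_le_length (by rw [List.length_drop]; omega)]

lemma winAt_big {l : List Char} {w : List Char} {k : Nat} (hw : w ≠ [])
    (h : l.length < k + w.length) : winAt l w k = false := by
  have hw0 : 0 < w.length := List.length_pos_of_ne_nil hw
  cases hv : winAt l w k with
  | false => rfl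
  | true =>
    unfold winAt at hv
    rw [beq_iff_eq] at hv
    have := congrArg List.length hv
    rw [List.length_take, List.length_drop] at this
    omega

lemma winAt_le {l : List Char} {w : List Char} {k : Nat} (hw : w ≠ [])
    (h : winAt l w k = true) : k + w.length ≤ l.length := by
  by_contra hh
  push Not at hh
  rw [winAt_big hw hh] at h
  cases h

lemma winAt_last {l : List Char} {w : List Char} (hm : w.length ≤ l.length) :
    winAt l w (l.length - w.length) = endsR l w.reverse := by
  unfold winAt endsR
  rw [List.length_reverse, List.take_reverse]
  have hlen : (l.drop (l.length - w.length)).length = w.length := by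
    rw [List.length_drop]; omega
  rw [List.take_of_length_le (le_of_eq hlen)]
  rw [Bool.eq_iff_iff, beq_iff_eq, beq_iff_eq, List.reverse_inj]

lemma idxsC_concat (l : List Char) (c : Char) (w : List Char) (hw : w ≠ []) :
    idxsC (l ++ [c]) w =
      idxsC l w ++ (if endsR (l ++ [c]) w.reverse then [l.length + 1 - w.length] else []) := by
  have hw0 : 0 < w.length := List.length_pos_of_ne_nil hw
  unfold idxsC
  have hlen' : (l ++ [c]).length = l.length + 1 := by simp
  rw [hlen']
  by_cases he : endsR (l ++ [c]) w.reverse = true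
  · -- a new window appears at position l.length + 1 - w.length
    have hm : w.length ≤ l.length + 1 := by
      have := endsR_len he
      rw [List.length_reverse] at this
      omega
    set q := l.length + 1 - w.length with hq
    have hsplit : List.range (l.length + 1) =
        List.range q ++ (List.range w.length).map (fun x => q + x) := by
      rw [← List.range_add]; congr 1; omega
    rw [hsplit, List.filter_append, List.filter_map]
    have h2 : (List.range w.length).filter ((winAt (l ++ [c]) w) ∘ (fun x => q + x)) = [0] := by
      obtain ⟨m', hm'⟩ : ∃ m', w.length = m' + 1 := ⟨w.length - 1, by omega⟩
      rw [hm', List.range_succ_eq_map]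
      rw [List.filter_cons]
      have h0 : (winAt (l ++ [c]) w ∘ fun x => q + x) 0 = true := by
        show winAt (l ++ [c]) w (q + 0) = true
        have : q + 0 = (l ++ [c]).length - w.length := by rw [hlen']; omega
        rw [this, winAt_last (by rw [hlen']; exact hm)]
        exact he
      rw [h0, if_pos rfl]
      have hrest : ((List.range m').map Nat.succ).filter
          ((winAt (l ++ [c]) w) ∘ (fun x => q + x)) = [] := by
        rw [List.filter_eq_nil_iff]
        intro t ht
        obtain ⟨t', _, rfl⟩ := List.mem_map.mp ht
        show ¬ winAt (l ++ [c]) w (q + Nat.succ t') = true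
        rw [winAt_big hw (by rw [hlen']; omega)]
        simp
      rw [hrest]
    rw [h2]
    have h1 : (List.range q).filter (winAt (l ++ [c]) w) =
        (List.range l.length).filter (winAt l w) := by
      have hsplit2 : List.range l.length =
          List.range q ++ (List.range (l.length - q)).map (fun x => q + x) := by
        rw [← List.range_add]; congr 1; omega
      rw [hsplit2, List.filter_append]
      have hz : ((List.range (l.length - q)).map (fun x => q + x)).filter (winAt l w) = [] := by
        rw [List.filter_eq_nil_iff]
        intro t ht
        obtain ⟨t', _, rfl⟩ := List.mem_map.mp ht
        show ¬ winAt l w (q + t') = true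
        rw [winAt_big hw (by omega)]
        simp
      rw [hz, List.append_nil]
      apply List.filter_congr
      intro k hk
      have hk' : k < q := List.mem_range.mp hk
      exact winAt_low c (by omega)
    rw [h1, if_pos he]
    simp [hq]
  · -- no new window: the filtered lists coincide
    rw [if_neg he, List.append_nil, List.range_succ, List.filter_append]
    have hlast : winAt (l ++ [c]) w l.length = false := by
      cases hv : winAt (l ++ [c]) w l.length with
      | false => rfl
      | true =>
        have hle := winAt_le hw hv
        rw [hlen'] at hle
        have hw1 : w.length = 1 := by omega
        have : l.length = (l ++ [c]).length - w.length := by rw [hlen']; omega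
        rw [this, winAt_last (by rw [hlen']; omega)] at hv
        exact absurd hv he
    rw [List.filter_cons, hlast]
    simp only [List.filter_nil, Bool.false_eq_true, if_false, List.append_nil]
    apply List.filter_congr
    intro k hk
    have hk' : k < l.length := List.mem_range.mp hk
    by_cases hc : k + w.length ≤ l.length
    · exact winAt_low c hc
    · push Not at hc
      rw [winAt_big hw hc]
      by_cases hc2 : k + w.length ≤ l.length + 1
      · have hk2 : k = (l ++ [c]).length - w.length := by rw [hlen']; omega
        rw [hk2, winAt_last (by rw [hlen']; omega)]
        exact Bool.eq_false_iff.mpr (fun hh => he hh)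
      · push Not at hc2
        exact winAt_big hw (by rw [hlen']; omega)

lemma cnt_step (l : List Char) (c : Char) :
    cntOf (l ++ [c]) = cntOf l + (if endsR (l ++ [c]) ['K', 'C', 'I', 'K'] then 1 else 0) := by
  unfold cntOf
  have : kickW.reverse = ['K', 'C', 'I', 'K'] := rfl
  rw [idxsC_concat l c kickW (by decide), this, List.length_append]
  split <;> simp

lemma mem_idxsC {l w : List Char} {k : Nat} (h : k ∈ idxsC l w) : winAt l w k = true :=
  (List.mem_filter.mp h).2

lemma ans_step (l : List Char) (c : Char) :
    ansOf (l ++ [c]) = ansOf l +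
      (if endsR (l ++ [c]) ['T', 'R', 'A', 'T', 'S'] then cntOf (l ++ [c]) else 0) := by
  have hkrev : kickW.reverse = ['K', 'C', 'I', 'K'] := rfl
  have hsrev : startW.reverse = ['T', 'R', 'A', 'T', 'S'] := rfl
  unfold ansOf
  rw [idxsC_concat l c startW (by decide), hsrev, List.map_append, List.sum_append]
  congr 1
  · -- old START indices see the same KICK indices
    refine congrArg List.sum (List.map_congr_left ?_)
    intro j hj
    have hjw : winAt l startW j = true := mem_idxsC hj
    have hj5 : j + 5 ≤ l.length := by
      have := winAt_le (by decide) hjw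
      simpa [startW] using this
    rw [idxsC_concat l c kickW (by decide), hkrev, List.filter_append]
    have : (if endsR (l ++ [c]) ['K', 'C', 'I', 'K'] then [l.length + 1 - kickW.length]
        else []).filter (fun k => decide (k ≤ j)) = [] := by
      split
      · rename_i hek
        have h4 : 4 ≤ l.length + 1 := by
          have := endsR_len hek
          simpa using this
        simp only [List.filter_cons, List.filter_nil]
        have : ¬ (l.length + 1 - kickW.length ≤ j) := by
          show ¬ (l.length + 1 - 4 ≤ j)
          omega
        simp [this]
      · simp
    rw [this, List.append_nil]
  · -- the new START index (if any) sees every KICK index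
    split
    · rename_i hes
      have h5 : 5 ≤ l.length + 1 := by
        have := endsR_len hes
        simpa using this
      simp only [List.map_cons, List.map_nil, List.sum_cons, List.sum_nil, add_zero]
      unfold cntOf
      congr 1
      have hfull : (idxsC (l ++ [c]) kickW).filter
          (fun k => decide (k ≤ l.length + 1 - startW.length)) = idxsC (l ++ [c]) kickW := by
        apply List.filter_eq_self.mpr
        intro k hk
        have hkw : winAt (l ++ [c]) kickW k = true := mem_idxsC hk
        have hk4 : k + 4 ≤ l.length + 1 := by
          have := winAt_le (by decide) hkw
          simpa [kickW] using this
        have hkne : k ≠ l.length + 1 - 4 := by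
          intro hkeq
          have hek : endsR (l ++ [c]) kickW.reverse = true := by
            have h4 : kickW.length ≤ (l ++ [c]).length := by
              simp [kickW]; omega
            rw [← winAt_last h4]
            have : (l ++ [c]).length - kickW.length = k := by
              simp [kickW]; omega
            rw [this]
            exact hkw
          rw [hkrev] at hek
          have := endsR_unique hek hes (by decide)
          simp at this
        simp only [decide_eq_true_eq]
        show k ≤ l.length + 1 - 5
        omega
      rw [hfull]
    · simp

-- guard translations: each of A's branch guards is exactly "the extended string ends with …"
lemma kc_eq_one (l : List Char) : ((kcOf l) == 1) = endsR l ['I', 'K'] := by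
  cases hC : endsR l ['C', 'I', 'K'] with
  | false =>
    cases hI : endsR l ['I', 'K'] <;> simp [kcOf, hC, hI]
  | true =>
    have hIf : endsR l ['I', 'K'] = false := endsR_clash (by decide) (by decide) hC
    simp [kcOf, hC, hIf]

lemma kc_eq_two (l : List Char) : ((kcOf l) == 2) = endsR l ['C', 'I', 'K'] := by
  cases hC : endsR l ['C', 'I', 'K'] with
  | true => simp [kcOf, hC]
  | false => cases hI : endsR l ['I', 'K'] <;> simp [kcOf, hC, hI]

lemma sc_eq_one (l : List Char) : ((scOf l) == 1) = endsR l ['T', 'S'] := by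
  cases hR : endsR l ['R', 'A', 'T', 'S'] with
  | true =>
    have h1 : endsR l ['T', 'S'] = false := endsR_clash (by decide) (by decide) hR
    simp [scOf, hR, h1]
  | false =>
    cases hA : endsR l ['A', 'T', 'S'] with
    | true =>
      have h1 : endsR l ['T', 'S'] = false := endsR_clash (by decide) (by decide) hA
      simp [scOf, hR, hA, h1]
    | false => cases hT : endsR l ['T', 'S'] <;> simp [scOf, hR, hA, hT]

lemma sc_eq_two (l : List Char) : ((scOf l) == 2) = endsR l ['A', 'T', 'S'] := by
  cases hR : endsR l ['R', 'A', 'T', 'S'] with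
  | true =>
    have h1 : endsR l ['A', 'T', 'S'] = false := endsR_clash (by decide) (by decide) hR
    simp [scOf, hR, h1]
  | false =>
    cases hA : endsR l ['A', 'T', 'S'] with
    | true => simp [scOf, hR, hA]
    | false => cases hT : endsR l ['T', 'S'] <;> simp [scOf, hR, hA, hT]

lemma sc_eq_three (l : List Char) : ((scOf l) == 3) = endsR l ['R', 'A', 'T', 'S'] := by
  cases hR : endsR l ['R', 'A', 'T', 'S'] with
  | true => simp [scOf, hR]
  | false =>
    cases hA : endsR l ['A', 'T', 'S'] with
    | true => simp [scOf, hR, hA]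
    | false => cases hT : endsR l ['T', 'S'] <;> simp [scOf, hR, hA, hT]

lemma guard_KI (l : List Char) (c : Char) :
    (prevOf l == ['K'] && c == 'I') = endsR (l ++ [c]) ['I', 'K'] := by
  rw [endsR_concat, prev_beq, Bool.and_comm]

lemma guard_KIC (l : List Char) (c : Char) :
    (prevOf l == ['I'] && c == 'C' && (kcOf l == 1)) = endsR (l ++ [c]) ['C', 'I', 'K'] := by
  rw [endsR_concat, kc_eq_one]
  cases hIK : endsR l ['I', 'K'] with
  | true =>
    have hI : endsR l ['I'] = true := by
      have := endsR_take hIK 1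
      simpa using this
    rw [prev_beq, hI]
    simp [Bool.and_comm]
  | false => simp

lemma guard_KICK (l : List Char) (c : Char) :
    (prevOf l == ['C'] && c == 'K' && (kcOf l == 2)) = endsR (l ++ [c]) ['K', 'C', 'I', 'K'] := by
  rw [endsR_concat, kc_eq_two]
  cases hCIK : endsR l ['C', 'I', 'K'] with
  | true =>
    have hC : endsR l ['C'] = true := by
      have := endsR_take hCIK 1
      simpa using this
    rw [prev_beq, hC]
    simp [Bool.and_comm]
  | false => simp

lemma guard_ST (l : List Char) (c : Char) :
    (prevOf l == ['S'] && c == 'T') = endsR (l ++ [c]) ['T', 'S'] := by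
  rw [endsR_concat, prev_beq, Bool.and_comm]

lemma guard_STA (l : List Char) (c : Char) :
    (prevOf l == ['T'] && c == 'A' && (scOf l == 1)) = endsR (l ++ [c]) ['A', 'T', 'S'] := by
  rw [endsR_concat, sc_eq_one]
  cases hTS : endsR l ['T', 'S'] with
  | true =>
    have hT : endsR l ['T'] = true := by
      have := endsR_take hTS 1
      simpa using this
    rw [prev_beq, hT]
    simp [Bool.and_comm]
  | false => simp

lemma guard_STAR (l : List Char) (c : Char) :
    (prevOf l == ['A'] && c == 'R' && (scOf l == 2)) = endsR (l ++ [c]) ['R', 'A', 'T', 'S'] := by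
  rw [endsR_concat, sc_eq_two]
  cases hATS : endsR l ['A', 'T', 'S'] with
  | true =>
    have hA : endsR l ['A'] = true := by
      have := endsR_take hATS 1
      simpa using this
    rw [prev_beq, hA]
    simp [Bool.and_comm]
  | false => simp

lemma guard_START (l : List Char) (c : Char) :
    (prevOf l == ['R'] && c == 'T' && (scOf l == 3)) =
      endsR (l ++ [c]) ['T', 'R', 'A', 'T', 'S'] := by
  rw [endsR_concat, sc_eq_three]
  cases hRATS : endsR l ['R', 'A', 'T', 'S'] with
  | true =>
    have hR : endsR l ['R'] = true := by
      have := endsR_take hRATS 1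
      simpa using this
    rw [prev_beq, hR]
    simp [Bool.and_comm]
  | false => simp

lemma step_ck (l : List Char) (c : Char) :
    (if prevOf l == ['K'] && c == 'I' then ((cntOf l : Int), (1 : Int))
     else if prevOf l == ['I'] && c == 'C' && (kcOf l == 1) then (cntOf l, 2)
     else if prevOf l == ['C'] && c == 'K' && (kcOf l == 2) then (cntOf l + 1, 0)
     else (cntOf l, 0))
      = (cntOf (l ++ [c]), kcOf (l ++ [c])) := by
  have hkc : kcOf (l ++ [c]) =
      if endsR (l ++ [c]) ['C', 'I', 'K'] then 2
      else if endsR (l ++ [c]) ['I', 'K'] then 1 else 0 := rfl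
  rw [cnt_step, hkc, ← guard_KI, ← guard_KIC, ← guard_KICK]
  by_cases h1 : (prevOf l == ['K'] && c == 'I') = true <;>
  by_cases h2 : (prevOf l == ['I'] && c == 'C' && (kcOf l == 1)) = true <;>
  by_cases h3 : (prevOf l == ['C'] && c == 'K' && (kcOf l == 2)) = true <;>
  simp_all
  all_goals split_ifs <;> simp_all

lemma step_sa (l : List Char) (c : Char) :
    (if prevOf l == ['S'] && c == 'T' then ((ansOf l : Int), (1 : Int))
     else if prevOf l == ['T'] && c == 'A' && (scOf l == 1) then (ansOf l, 2)
     else if prevOf l == ['A'] && c == 'R' && (scOf l == 2) then (ansOf l, 3)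
     else if prevOf l == ['R'] && c == 'T' && (scOf l == 3) then
       (ansOf l + (cntOf (l ++ [c]), kcOf (l ++ [c])).1, 0)
     else (ansOf l, 0))
      = (ansOf (l ++ [c]), scOf (l ++ [c])) := by
  have hsc : scOf (l ++ [c]) =
      if endsR (l ++ [c]) ['R', 'A', 'T', 'S'] then 3
      else if endsR (l ++ [c]) ['A', 'T', 'S'] then 2
      else if endsR (l ++ [c]) ['T', 'S'] then 1 else 0 := rfl
  rw [ans_step, hsc, ← guard_ST, ← guard_STA, ← guard_STAR, ← guard_START]
  by_cases h4 : (prevOf l == ['S'] && c == 'T') = true <;>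
  by_cases h5 : (prevOf l == ['T'] && c == 'A' && (scOf l == 1)) = true <;>
  by_cases h6 : (prevOf l == ['A'] && c == 'R' && (scOf l == 2)) = true <;>
  by_cases h7 : (prevOf l == ['R'] && c == 'T' && (scOf l == 3)) = true <;>
  simp_all
  all_goals split_ifs <;> simp_all

lemma fold_inv (l : List Char) :
    l.foldl solveStep (0, 0, 0, 0, ([] : List Char)) =
      (cntOf l, ansOf l, kcOf l, scOf l, prevOf l) := by
  induction l using List.reverseRecOn with
  | nil => decide
  | append_singleton l c ih =>
    rw [List.foldl_append, ih]
    simp only [List.foldl_cons, List.foldl_nil, solveStep]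
    rw [step_ck, step_sa]
    simp [prev_concat]

theorem solve_eq_ansOf (s : String) : solve s = ansOf s.toList := by
  unfold solve
  rw [fold_inv]

lemma pyIdx_bridge (l w : List Char) :
    (PySem.List.pyRange 0 (PySem.List.len l) 1).filter
        (fun i => PySem.List.slice l (some i) (some (i + (w.length : Int))) == w)
      = (idxsC l w).map (fun k : Nat => (k : Int)) := by
  rw [PySem.List.len_eq, PySem.List.pyRange_one, List.filter_map]
  unfold idxsC winAt
  have harg : ((l.length : Int) - 0).toNat = l.length := by omega
  rw [harg]
  simp only [zero_add]
  refine congrArg (List.map fun k : Nat => (k : Int)) (List.filter_congr ?_)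
  intro k _
  show (PySem.List.slice l (some (k : Int)) (some ((k : Int) + (w.length : Int))) == w)
      = ((l.drop k).take w.length == w)
  rw [PySem.List.slice_natCast_add]

theorem solve_alt_eq_ansOf (s : String) : solve_alt s = ansOf s.toList := by
  show ((((PySem.List.pyRange 0 (PySem.List.len s.toList) 1).filter
      (fun j => PySem.List.slice s.toList (some j) (some (j + 5)) == "START".toList))).map
      (fun j => ((((PySem.List.pyRange 0 (PySem.List.len s.toList) 1).filter
        (fun i => PySem.List.slice s.toList (some i) (some (i + 4)) == "KICK".toList)).filter
        (fun k => decide (k ≤ j))).length : Int))).sum = ansOf s.toList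
  rw [show ("KICK".toList : List Char) = kickW from rfl,
      show ("START".toList : List Char) = startW from rfl]
  rw [show (fun (i : Int) => PySem.List.slice s.toList (some i) (some (i + 4)) == kickW)
      = (fun (i : Int) => PySem.List.slice s.toList (some i)
          (some (i + (kickW.length : Int))) == kickW) from rfl]
  rw [show (fun (j : Int) => PySem.List.slice s.toList (some j) (some (j + 5)) == startW)
      = (fun (j : Int) => PySem.List.slice s.toList (some j)
          (some (j + (startW.length : Int))) == startW) from rfl]
  rw [pyIdx_bridge, pyIdx_bridge]
  unfold ansOf
  rw [List.map_map]
  refine congrArg List.sum (List.map_congr_left ?_)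
  intro j _
  show ((((idxsC s.toList kickW).map (fun k : Nat => (k : Int))).filter
      (fun k => decide (k ≤ (j : Int)))).length : Int)
      = (((idxsC s.toList kickW).filter (fun k => decide (k ≤ j))).length : Int)
  simp [List.filter_map, Function.comp_def, Nat.cast_le]

-- ===== VERDICT (by name: the statement is the Claim_ definition above) =====
theorem solve_spec : Claim_equal_solve := by
  unfold Claim_equal_solve Spec_solve
  intro s _
  rw [solve_eq_ansOf, solve_alt_eq_ansOf]
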